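-- pv_equiv track=rewrite | github.com/jh-lau/leetcode_in_python | 01-数据结构/数组/905.按奇偶排序数组.py | sort_array_by_parity_v3
-- ===== SOURCE A (Python) =====
-- from typing import List
--
-- def sort_array_by_parity_v3(A: List[int]) -> List[int]:
--     result = [0 for _ in range(len(A))]
--     end = len(A) - 1
--     start = 0
--     for s in A:
--         if s % 2:
--             result[end] = s
--             end -= 1
--         else:
--             result[start] = s
--             start += 1
--
--     return result
-- ===== SOURCE B (Python) =====
-- from typing import List
--
-- def sort_array_by_parity_v3(A: List[int]) -> List[int]:
--     evens = [x for x in A if x % 2 == 0]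
--     odds = [x for x in A if x % 2 == 1]
--     return evens + odds[::-1]
-- ===== Notes on version B (the rewrite author's own statement) =====
-- stated objective: simpler
-- what changed: Replaces the preallocated array filled by a two-pointer front/back walk with two filtering passes (evens, odds) followed by reversing the odds and concatenating.
import Mathlib
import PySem

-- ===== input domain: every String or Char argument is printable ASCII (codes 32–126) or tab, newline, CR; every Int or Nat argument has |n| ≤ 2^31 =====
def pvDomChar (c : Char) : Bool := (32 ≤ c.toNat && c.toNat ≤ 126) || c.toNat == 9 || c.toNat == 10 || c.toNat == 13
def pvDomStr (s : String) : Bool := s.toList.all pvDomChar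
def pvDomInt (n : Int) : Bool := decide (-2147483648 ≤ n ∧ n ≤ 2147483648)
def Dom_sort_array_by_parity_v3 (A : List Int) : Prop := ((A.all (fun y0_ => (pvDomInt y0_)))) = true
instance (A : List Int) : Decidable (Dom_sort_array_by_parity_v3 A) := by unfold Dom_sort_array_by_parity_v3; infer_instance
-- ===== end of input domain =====

-- ===== PORT A =====
-- B replaces the two-pointer fill of a preallocated array with two filter passes
-- plus a reversal of the odds (objective: simpler).
-- Port of A: preallocated zero list, loop fills evens from the front, odds from the back.
-- Loop body of A (if s % 2: result[end] = s; end -= 1  else: result[start] = s; start += 1).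
def pvStepA (acc : List Int × Int × Int) (s : Int) : List Int × Int × Int :=
  if PySem.Int.mod s 2 ≠ 0 then
    (acc.1.set acc.2.2.toNat s, acc.2.1, acc.2.2 - 1)      -- index always in range here
  else
    (acc.1.set acc.2.1.toNat s, acc.2.1 + 1, acc.2.2)

def sort_array_by_parity_v3 (A : List Int) : List Int :=
  -- result = [0 for _ in range(len(A))]; end = len(A) - 1; start = 0; for s in A: …
  (A.foldl pvStepA (List.replicate A.length 0, 0, (A.length : Int) - 1)).1

-- ===== PORT B =====
def sort_array_by_parity_v3_alt (A : List Int) : List Int :=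
  (A.filter (fun x => PySem.Int.mod x 2 == 0)) ++ (A.filter (fun x => PySem.Int.mod x 2 == 1)).reverse

-- ===== PRECONDITION & SPEC =====
def Spec_sort_array_by_parity_v3 (A : List Int) (out : List Int) : Prop := out = sort_array_by_parity_v3_alt A
instance (A : List Int) (out : List Int) : Decidable (Spec_sort_array_by_parity_v3 A out) := by unfold Spec_sort_array_by_parity_v3; infer_instance

-- ===== CLAIM (what is proved, stated in full; the proofs are below) =====
def Claim_equal_sort_array_by_parity_v3 : Prop := ∀ (A : List Int), Dom_sort_array_by_parity_v3 A → Spec_sort_array_by_parity_v3 A (sort_array_by_parity_v3 A)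

-- ===== LEMMAS AND PROOFS =====

-- Loop invariant: running A's loop on l with result = E ++ zeros ++ O, start = |E| and
-- end pointing at the last zero yields E ++ evens(l) ++ reverse (odds l) ++ O.
theorem pv_loop (l : List Int) : ∀ (E O : List Int),
    (l.foldl pvStepA
      (E ++ List.replicate l.length 0 ++ O, (E.length : Int), (E.length : Int) + l.length - 1)).1
    = E ++ l.filter (fun x => PySem.Int.mod x 2 == 0)
        ++ (l.filter (fun x => PySem.Int.mod x 2 == 1)).reverse ++ O := by
  induction l with
  | nil => simp
  | cons x l ih =>
    intro E O
    rcases PySem.Int.mod_two_eq x with h | h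
    · -- even: x is written at position start = |E|
      have hstep : pvStepA (E ++ List.replicate (x :: l).length 0 ++ O,
            (E.length : Int), (E.length : Int) + (x :: l).length - 1) x
          = ((E ++ [x]) ++ List.replicate l.length 0 ++ O,
            ((E ++ [x]).length : Int), ((E ++ [x]).length : Int) + l.length - 1) := by
        unfold pvStepA
        rw [if_neg (by rw [ne_eq, h]; simp)]
        refine Prod.ext ?_ (Prod.ext (by simp) ?_)
        · show (E ++ List.replicate (x :: l).length 0 ++ O).set ((E.length : Int)).toNat x = _
          rw [Int.toNat_natCast, List.append_assoc, List.set_append_right _ _ (by simp)]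
          simp [List.replicate_succ]
        · show (E.length : Int) + ((x :: l).length : Int) - 1 = _
          simp only [List.length_cons, List.length_append, List.length_nil]
          push_cast
          ring
      rw [List.foldl_cons, hstep, ih]
      simp only [List.filter_cons, h]
      simp
    · -- odd: x is written at position end = |E| + l.length (the last zero)
      have hstep : pvStepA (E ++ List.replicate (x :: l).length 0 ++ O,
            (E.length : Int), (E.length : Int) + (x :: l).length - 1) x
          = (E ++ List.replicate l.length 0 ++ (x :: O),
            (E.length : Int), (E.length : Int) + l.length - 1) := by
        unfold pvStepA
        rw [if_pos (by rw [ne_eq, h]; simp)]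
        refine Prod.ext ?_ (Prod.ext rfl ?_)
        · show (E ++ List.replicate (x :: l).length 0 ++ O).set
            ((E.length : Int) + ((x :: l).length : Int) - 1).toNat x = _
          have ht : ((E.length : Int) + ((x :: l).length : Int) - 1).toNat
              = E.length + l.length := by
            simp only [List.length_cons]
            omega
          rw [ht, List.append_assoc, List.set_append_right _ _ (by simp)]
          rw [show List.replicate (x :: l).length (0 : Int)
                = List.replicate l.length 0 ++ [0] from by simp [List.replicate_succ']]
          rw [List.append_assoc, List.set_append_right _ _ (by simp)]
          simp
        · show (E.length : Int) + ((x :: l).length : Int) - 1 - 1 = _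
          simp only [List.length_cons]
          push_cast
          ring
      rw [List.foldl_cons, hstep, ih E (x :: O)]
      simp only [List.filter_cons, h]
      simp

-- ===== VERDICT (by name: the statement is the Claim_ definition above) =====
theorem sort_array_by_parity_v3_spec : Claim_equal_sort_array_by_parity_v3 := by
  intro A _
  unfold Spec_sort_array_by_parity_v3 sort_array_by_parity_v3 sort_array_by_parity_v3_alt
  simpa using pv_loop A [] []
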